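-- pv_equiv track=rewrite | github.com/smilingprogrammer/TechDocAgent | techdocagent_advanced/change_detector.py | identify_affected_chunks
-- ===== SOURCE A (Python) =====
-- from typing import List, Dict, Set, Optional, Tuple
--
-- def identify_affected_chunks(changed_files: List[Dict], all_chunks: List[Dict]) -> Set[str]:
--     """
--     Identify which code chunks are affected by file changes.
--
--     Args:
--         changed_files: List of changed file dictionaries
--         all_chunks: List of all code chunks with file_path metadata
--
--     Returns:
--         Set of affected chunk identifiers
--     """
--     changed_paths = {change['file_path'] for change in changed_files}
--     affected_chunks = set()
--
--     for chunk in all_chunks: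
--         chunk_file = chunk.get('file_path', '')
--         if chunk_file in changed_paths:
--             # Create a unique identifier for the chunk
--             chunk_id = f"{chunk_file}:{chunk.get('name', 'unknown')}:{chunk.get('start_line', 0)}"
--             affected_chunks.add(chunk_id)
--
--     return affected_chunks
-- ===== SOURCE B (Python) =====
-- def identify_affected_chunks(changed_files, all_chunks):
--     """Inverted traversal: index chunk positions by file path, mark the
--     positions hit by each change, then emit the ids of the marked chunks."""
--     positions = {}
--     for i, chunk in enumerate(all_chunks):
--         positions.setdefault(chunk.get('file_path', ''), []).append(i)
--     hits = set()
--     for change in changed_files: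
--         hits.update(positions.get(change['file_path'], []))
--     return {
--         f"{chunk.get('file_path', '')}:{chunk.get('name', 'unknown')}:{chunk.get('start_line', 0)}"
--         for i, chunk in enumerate(all_chunks)
--         if i in hits
--     }
-- ===== Notes on version B (the rewrite author's own statement) =====
-- stated objective: alternative
-- what changed: Inverts the traversal: builds a file_path -> chunk-position index over all_chunks, iterates changed_files marking the hit positions in a set, then emits the ids of the marked chunks; Pre_ excludes only changed-file dicts missing 'file_path', where A raises KeyError (B raises too).
import Mathlib
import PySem

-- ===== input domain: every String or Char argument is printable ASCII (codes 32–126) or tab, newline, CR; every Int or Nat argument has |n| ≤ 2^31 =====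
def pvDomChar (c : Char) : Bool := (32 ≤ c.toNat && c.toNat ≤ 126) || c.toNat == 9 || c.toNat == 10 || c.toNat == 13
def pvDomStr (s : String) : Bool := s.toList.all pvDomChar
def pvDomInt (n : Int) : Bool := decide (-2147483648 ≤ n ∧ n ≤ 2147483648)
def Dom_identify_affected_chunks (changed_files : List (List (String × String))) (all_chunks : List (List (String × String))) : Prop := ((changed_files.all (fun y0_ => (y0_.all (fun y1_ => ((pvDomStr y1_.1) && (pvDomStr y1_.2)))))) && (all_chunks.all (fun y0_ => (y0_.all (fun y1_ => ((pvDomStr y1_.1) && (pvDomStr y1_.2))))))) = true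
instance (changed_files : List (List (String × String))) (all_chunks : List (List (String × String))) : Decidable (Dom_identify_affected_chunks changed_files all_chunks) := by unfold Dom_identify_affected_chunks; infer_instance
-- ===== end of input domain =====

-- B inverts the traversal: a file_path -> chunk-position index, a hit-set filled per change,
-- then the ids of the marked chunks (objective: alternative algorithm, not faster).


-- ===== PORT A =====
-- change['file_path'] raises KeyError on a missing key; Pre_ guarantees the key is present,
-- so '(… .get? "file_path").getD ""' is exact on every admitted input.
def identify_affected_chunks (changed_files : List (List (String × String))) (all_chunks : List (List (String × String))) : List String :=
  let changed_paths : PySem.Set String :=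
    PySem.Set.ofList (changed_files.map (fun change => ((PySem.Dict.mk change).get? "file_path").getD ""))
  all_chunks.foldl (fun affected_chunks chunk =>
    let chunk_file := (PySem.Dict.mk chunk).getD "file_path" ""
    if PySem.Set.contains changed_paths chunk_file then
      PySem.Set.add affected_chunks
        (chunk_file ++ ":" ++ (PySem.Dict.mk chunk).getD "name" "unknown" ++ ":" ++ (PySem.Dict.mk chunk).getD "start_line" "0")
    else affected_chunks) PySem.Set.empty

-- ===== PORT B =====
-- 'positions.setdefault(path, []).append(i)' is PySem.Dict.modify path [] (· ++ [i]);
-- 'hits.update(…)' is PySem.Set.update; Python's f"{0}" is "0".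
def identify_affected_chunks_alt (changed_files : List (List (String × String))) (all_chunks : List (List (String × String))) : List String :=
  let positions : PySem.Dict String (List Int) :=
    (PySem.List.enumerate all_chunks).foldl (fun d pc =>
      d.modify ((PySem.Dict.mk pc.2).getD "file_path" "") [] (· ++ [pc.1])) PySem.Dict.empty
  let hits : PySem.Set Int :=
    changed_files.foldl (fun s change =>
      PySem.Set.update s (positions.getD (((PySem.Dict.mk change).get? "file_path").getD "") [])) PySem.Set.empty
  (PySem.List.enumerate all_chunks).foldl (fun out pc =>
    if PySem.Set.contains hits pc.1 then
      PySem.Set.add out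
        ((PySem.Dict.mk pc.2).getD "file_path" "" ++ ":" ++ (PySem.Dict.mk pc.2).getD "name" "unknown" ++ ":" ++ (PySem.Dict.mk pc.2).getD "start_line" "0")
    else out) PySem.Set.empty

-- ===== PRECONDITION & SPEC =====
-- Pre_ excludes exactly the inputs on which Python A raises KeyError: a changed-file dict
-- without the key "file_path" (B raises there too).
def Pre_identify_affected_chunks (changed_files : List (List (String × String))) (all_chunks : List (List (String × String))) : Prop :=
  ∀ change ∈ changed_files, "file_path" ∈ change.map Prod.fst
instance (changed_files : List (List (String × String))) (all_chunks : List (List (String × String))) : Decidable (Pre_identify_affected_chunks changed_files all_chunks) := by unfold Pre_identify_affected_chunks; infer_instance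
def pvWitness_identify_affected_chunks : (List (List (String × String))) × (List (List (String × String))) :=
  ([[("file_path", "a.py")]], [[("file_path", "a.py"), ("name", "f"), ("start_line", "3")], [("file_path", "b.py")]])

def Spec_identify_affected_chunks (changed_files : List (List (String × String))) (all_chunks : List (List (String × String))) (out : List String) : Prop := out = identify_affected_chunks_alt changed_files all_chunks
instance (changed_files : List (List (String × String))) (all_chunks : List (List (String × String))) (out : List String) : Decidable (Spec_identify_affected_chunks changed_files all_chunks out) := by unfold Spec_identify_affected_chunks; infer_instance

-- ===== CLAIM (what is proved, stated in full; the proofs are below) =====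
def Claim_equal_identify_affected_chunks : Prop := ∀ (changed_files : List (List (String × String))) (all_chunks : List (List (String × String))), Dom_identify_affected_chunks changed_files all_chunks → Pre_identify_affected_chunks changed_files all_chunks → Spec_identify_affected_chunks changed_files all_chunks (identify_affected_chunks changed_files all_chunks)

-- ===== LEMMAS AND PROOFS =====

-- membership in a hit-set built by repeated update
theorem pv_mem_foldl_update {α β : Type} [BEq α] [LawfulBEq α] (F : β → List α) :
    ∀ (L : List β) (s : PySem.Set α) (y : α),
      y ∈ L.foldl (fun s q => PySem.Set.update s (F q)) s ↔ y ∈ s ∨ ∃ q ∈ L, y ∈ F q := by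
  intro L
  induction L with
  | nil => simp
  | cons a t ih =>
    intro s y
    simp only [List.foldl_cons, ih, PySem.Set.mem_update, List.mem_cons]
    constructor
    · rintro ((h | h) | ⟨q, hq, hy⟩)
      · exact Or.inl h
      · exact Or.inr ⟨a, Or.inl rfl, h⟩
      · exact Or.inr ⟨q, Or.inr hq, hy⟩
    · rintro (h | ⟨q, (rfl | hq), hy⟩)
      · exact Or.inl (Or.inl h)
      · exact Or.inl (Or.inr hy)
      · exact Or.inr ⟨q, hq, hy⟩

theorem pv_core (path cid : List (String × String) → String) (chg : List String)
    (ac : List (List (String × String))) :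
    ac.foldl (fun s c => if PySem.Set.contains (PySem.Set.ofList chg) (path c) then PySem.Set.add s (cid c) else s) PySem.Set.empty
    =
    (PySem.List.enumerate ac).foldl (fun out pc =>
      if PySem.Set.contains
          (chg.foldl (fun s q => PySem.Set.update s
            (((PySem.List.enumerate ac).foldl (fun d pc => d.modify (path pc.2) [] (· ++ [pc.1])) PySem.Dict.empty).getD q [])) PySem.Set.empty)
          pc.1
      then PySem.Set.add out (cid pc.2) else out) PySem.Set.empty := by
  set positions := (PySem.List.enumerate ac).foldl (fun d pc => d.modify (path pc.2) [] (· ++ [pc.1])) PySem.Dict.empty with hpos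
  set hits := chg.foldl (fun s q => PySem.Set.update s (positions.getD q [])) PySem.Set.empty with hhits
  -- the index, looked up
  have hgetD : ∀ q, positions.getD q []
      = ((PySem.List.enumerate ac).filter (fun pc => path pc.2 == q)).map (fun pc => pc.1) := by
    intro q
    have hrw := (List.foldl_map
      (f := fun pc : Int × List (String × String) => (path pc.2, pc.1))
      (g := fun (d : PySem.Dict String (List Int)) (p : String × Int) => d.modify p.1 [] (· ++ [p.2]))
      (l := PySem.List.enumerate ac) (init := PySem.Dict.empty))
    rw [hpos, ← hrw, PySem.Dict.getD_foldl_modify_append, List.filter_map, List.map_map]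
    rfl
  -- the hit test agrees with the changed-path test on every enumerated chunk
  have hcond : ∀ pc ∈ PySem.List.enumerate ac,
      PySem.Set.contains hits pc.1 = PySem.Set.contains (PySem.Set.ofList chg) (path pc.2) := by
    intro pc hpc
    rw [Bool.eq_iff_iff, PySem.Set.contains_iff, PySem.Set.contains_iff, PySem.Set.mem_ofList,
      hhits, pv_mem_foldl_update]
    obtain ⟨k, hk, rfl⟩ := (PySem.List.mem_enumerate_iff _ _ _).mp hpc
    constructor
    · rintro (h | ⟨q, hq, hy⟩)
      · simp at h
      · rw [hgetD] at hy
        obtain ⟨pc', hpc', h1⟩ := List.mem_map.mp hy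
        obtain ⟨hpm, hpq⟩ := List.mem_filter.mp hpc'
        obtain ⟨k', hk', rfl⟩ := (PySem.List.mem_enumerate_iff _ _ _).mp hpm
        have : k' = k := by
          have : ((0 : Int) + k') = ((0 : Int) + k) := h1
          omega
        subst this
        simpa [← (eq_of_beq hpq : path ac[k'] = q)] using hq
    · intro h
      refine Or.inr ⟨path ac[k], h, ?_⟩
      rw [hgetD]
      exact List.mem_map.mpr ⟨((0 : Int) + k, ac[k]), List.mem_filter.mpr
        ⟨(PySem.List.mem_enumerate_iff _ _ _).mpr ⟨k, hk, rfl⟩, by simp⟩, rfl⟩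
  -- replace the condition, then collapse enumerate to the plain list
  have hrhs := PySem.List.foldl_congr_mem
    (l := PySem.List.enumerate ac) (init := (PySem.Set.empty : PySem.Set String))
    (f := fun out pc => if PySem.Set.contains hits pc.1 then PySem.Set.add out (cid pc.2) else out)
    (g := fun out pc => if PySem.Set.contains (PySem.Set.ofList chg) (path pc.2)
      then PySem.Set.add out (cid pc.2) else out)
    (by intro acc pc hpc; simp only [hcond pc hpc])
  rw [hrhs]
  conv_lhs => rw [← PySem.List.map_snd_enumerate ac 0]
  rw [List.foldl_map]

theorem identify_affected_chunks_eq (changed_files all_chunks : List (List (String × String))) :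
    identify_affected_chunks changed_files all_chunks = identify_affected_chunks_alt changed_files all_chunks := by
  unfold identify_affected_chunks identify_affected_chunks_alt
  have h := pv_core
    (fun c => (PySem.Dict.mk c).getD "file_path" "")
    (fun c => (PySem.Dict.mk c).getD "file_path" "" ++ ":" ++ (PySem.Dict.mk c).getD "name" "unknown" ++ ":" ++ (PySem.Dict.mk c).getD "start_line" "0")
    (changed_files.map (fun change => ((PySem.Dict.mk change).get? "file_path").getD ""))
    all_chunks
  rw [List.foldl_map] at h
  exact h

-- ===== VERDICT (by name: the statement is the Claim_ definition above) =====
theorem identify_affected_chunks_spec : Claim_equal_identify_affected_chunks := by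
  intro cf ac _ _
  unfold Spec_identify_affected_chunks
  exact identify_affected_chunks_eq cf ac
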